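-- pv_equiv track=rewrite | github.com/OpenDataServices/cove | cove_iati/lib/iati.py | get_zero_paths_list
-- ===== SOURCE A (Python) =====
-- def get_zero_paths_list(cell_path):
--     '''Get all combinations of zeroes removed/not removed in a cell source path
--
--     Returns a list. The list doesn't include the original path.
--
--     e.g:
--         'path/0/to/1/cell/0/source' will produce:
--
--         ['path/1/to/1/cell/0/source',
--          'path/0/to/1/cell/1/source',
--          'path/to/1/cell/source']
--     '''
--     cell_zero_indexes, cell_zero_combinations, zero_paths_list = [], [], []
--     cell_path_chars = cell_path.split('/')
--
--     for index, char in enumerate(cell_path_chars):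
--         if char == '0':
--             cell_zero_indexes.append(index)
--
--     n_zeros = len(cell_zero_indexes)
--     for i in range(1, 2 ** n_zeros):
--         cell_zero_combinations.append(bin(i)[2:].zfill(n_zeros))
--
--     for bin_repr in cell_zero_combinations:
--         for index_bit in zip(cell_zero_indexes, bin_repr):
--             if index_bit[1] == '0':
--                 cell_path_chars[index_bit[0]] = '0'
--             else:
--                 cell_path_chars[index_bit[0]] = None
--         path = '/'.join(filter(bool, cell_path_chars))
--         zero_paths_list.append(path)
--
--     return zero_paths_list
-- ===== SOURCE B (Python) =====
-- def get_zero_paths_list(cell_path):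
--     """Recursive keep/remove generation over the split segments instead of
--     binary counting; same ordered result, original path excluded."""
--     segments = cell_path.split('/')
--
--     def gen(segs):
--         # All keep/remove combinations of the '0' segments of segs, as segment
--         # lists, keep-branch before remove-branch (so the all-keep combo first).
--         if not segs:
--             return [[]]
--         head, rest = segs[0], segs[1:]
--         tails = gen(rest)
--         combos = [[head] + t for t in tails]
--         if head == '0':
--             combos += tails
--         return combos
--
--     return ['/'.join(s for s in combo if s) for combo in gen(segments)[1:]]
-- ===== Notes on version B (the rewrite author's own statement) =====
-- stated objective: alternative
-- what changed: Replaces A's binary counting over 2^n combinations (bin/zfill strings written back into a mutated segment list by index) with a direct recursive keep/remove generation over the split segments that builds each combination's segment list structurally, in the same order, skipping the all-keep leaf.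
import Mathlib
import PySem

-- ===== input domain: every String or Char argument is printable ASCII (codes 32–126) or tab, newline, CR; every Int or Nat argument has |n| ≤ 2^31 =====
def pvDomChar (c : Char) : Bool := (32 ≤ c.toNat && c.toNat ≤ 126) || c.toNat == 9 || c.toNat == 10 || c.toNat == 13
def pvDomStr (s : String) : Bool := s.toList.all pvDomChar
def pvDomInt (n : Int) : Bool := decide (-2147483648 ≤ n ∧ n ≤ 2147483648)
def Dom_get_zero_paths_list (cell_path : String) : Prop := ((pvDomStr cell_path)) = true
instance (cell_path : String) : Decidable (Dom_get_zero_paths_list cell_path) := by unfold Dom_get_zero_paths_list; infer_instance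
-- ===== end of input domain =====

-- B replaces A's binary counting over the zero positions by a recursive keep/remove
-- generation over the split segments (objective: alternative decomposition, same cost).

-- ===== PORT A =====
-- bin(i)[2:] for i ≥ 0: the binary digits of i, as the char list of the Python str
def pyBinChars (i : Nat) : List Char :=
  if i < 2 then [if i = 1 then '1' else '0']
  else pyBinChars (i / 2) ++ [if i % 2 = 1 then '1' else '0']
decreasing_by exact Nat.div_lt_self (by omega) (by omega)

-- Literal port of A. The Python list cell_path_chars later holds None, so it is
-- List (Option String) from the start (initial entries wrapped in `some`).
-- Python str values of '0'/'1' bits (bin_repr) are ported as their char lists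
-- (they are only built, iterated and compared char-wise). List indices come from
-- enumerate, hence are ≥ 0 and < length, so `.set idx.toNat` is exact for the
-- in-range Python list assignment.
def get_zero_paths_list (cell_path : String) : List String :=
  let cell_path_chars : List (Option String) :=
    ((PySem.Str.split? cell_path "/").getD []).map some   -- sep "/" ≠ "", so split? is always `some`
  let cell_zero_indexes : List Int :=
    (PySem.List.enumerate cell_path_chars 0).foldl
      (fun acc p => if p.2 = some "0" then acc ++ [p.1] else acc) []
  let n_zeros : Nat := cell_zero_indexes.length
  let cell_zero_combinations : List (List Char) :=
    (PySem.List.pyRange 1 ((2 : Int) ^ n_zeros)).foldl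
      (fun acc i => acc ++ [PySem.Chars.zfill (pyBinChars i.toNat) (n_zeros : Int)]) []
  let final :=
    cell_zero_combinations.foldl
      (fun (st : List (Option String) × List String) bin_repr =>
        let chars := (cell_zero_indexes.zip bin_repr).foldl
          (fun s index_bit =>
            if index_bit.2 = '0' then s.set index_bit.1.toNat (some "0")
            else s.set index_bit.1.toNat none) st.1
        -- filter(bool, …): keep exactly the non-None, non-empty strings
        let path := PySem.Str.join "/" (chars.filterMap (fun o => match o with
          | some s => if s = "" then none else some s
          | none => none))
        (chars, st.2 ++ [path]))
      (cell_path_chars, [])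
  final.2

-- ===== PORT B =====
-- all keep/remove combinations of the '0' segments, keep-branch first
def genCombos : List String → List (List String)
  | [] => [[]]
  | head :: rest =>
    let tails := genCombos rest
    let combos := tails.map (fun t => head :: t)
    if head = "0" then combos ++ tails else combos

def get_zero_paths_list_alt (cell_path : String) : List String :=
  let segments := (PySem.Str.split? cell_path "/").getD []   -- sep "/" ≠ "", always `some`
  ((genCombos segments).drop 1).map (fun combo =>
    PySem.Str.join "/" (combo.filter (fun s => decide (s ≠ ""))))

-- ===== PRECONDITION & SPEC =====
def Spec_get_zero_paths_list (cell_path : String) (out : List String) : Prop := out = get_zero_paths_list_alt cell_path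
instance (cell_path : String) (out : List String) : Decidable (Spec_get_zero_paths_list cell_path out) := by unfold Spec_get_zero_paths_list; infer_instance

-- ===== CLAIM (what is proved, stated in full; the proofs are below) =====
def Claim_equal_get_zero_paths_list : Prop := ∀ (cell_path : String), Dom_get_zero_paths_list cell_path → Spec_get_zero_paths_list cell_path (get_zero_paths_list cell_path)

-- ===== LEMMAS AND PROOFS =====

-- number of "0" segments
def cz : List String → Nat
  | [] => 0
  | s :: r => (if s = "0" then 1 else 0) + cz r

-- positions of the "0" segments
def zidxN : List String → List Nat
  | [] => []
  | s :: r => (if s = "0" then [0] else []) ++ (zidxN r).map (· + 1)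

-- the n-bit big-endian binary expansion of i
def nbits (n i : Nat) : List Bool := ((List.range n).map i.testBit).reverse

-- all bit vectors of length n, in counting order
def allVecs : Nat → List (List Bool)
  | 0 => [[]]
  | n + 1 => (allVecs n).map (false :: ·) ++ (allVecs n).map (true :: ·)

def bchar (b : Bool) : Char := if b then '1' else '0'

-- B's combo under assignment v to the "0" segments (true = removed)
def pick : List String → List Bool → List String
  | [], _ => []
  | s :: r, v =>
    if s = "0" then
      match v with
      | [] => s :: pick r []
      | b :: v' => if b then pick r v' else s :: pick r v'
    else s :: pick r v

-- A's mutated list under assignment v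
def stA : List String → List Bool → List (Option String)
  | [], _ => []
  | s :: r, v =>
    if s = "0" then
      match v with
      | [] => some s :: stA r []
      | b :: v' => (if b then none else some "0") :: stA r v'
    else some s :: stA r v

-- the inner write loop, on Nat indices
def writeN (pairs : List (Nat × Char)) (s0 : List (Option String)) : List (Option String) :=
  pairs.foldl (fun s ib => if ib.2 = '0' then s.set ib.1 (some "0") else s.set ib.1 none) s0

theorem length_zidxN (segs : List String) : (zidxN segs).length = cz segs := by
  induction segs with
  | nil => rfl
  | cons s r ih => by_cases hs : s = "0" <;> simp [zidxN, cz, hs, ih] <;> omega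

theorem flatMap_cast (l : List Nat) :
    List.flatMap (fun a : Nat => [(a : Int)]) l = l.map (fun a : Nat => (a : Int)) := by
  induction l with
  | nil => rfl
  | cons a l ih => simp [List.flatMap_cons, ih]

theorem enumFold_eq (segs : List String) : ∀ (s : Int) (acc : List Int),
    (PySem.List.enumerate (segs.map some) s).foldl
      (fun acc p => if p.2 = some "0" then acc ++ [p.1] else acc) acc
    = acc ++ (zidxN segs).map (fun k => s + (k : Int)) := by
  induction segs with
  | nil => intro s acc; simp [zidxN, PySem.List.enumerate_nil]
  | cons x r ih =>
    intro s acc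
    rw [List.map_cons, PySem.List.enumerate_cons, List.foldl_cons]
    by_cases hx : x = "0"
    · subst hx
      rw [if_pos rfl, ih]
      simp [zidxN, List.append_assoc]
      simp only [flatMap_cast, List.map_map]
      apply List.map_congr_left
      intro k _
      simp only [Function.comp_apply]
      push_cast
      ring
    · rw [if_neg (by simpa using hx), ih]
      simp [zidxN, hx]
      simp only [flatMap_cast, List.map_map]
      apply List.map_congr_left
      intro k _
      simp only [Function.comp_apply]
      push_cast
      ring

theorem foldl_app {α β : Type} (g : α → β) (l : List α) (acc : List β) :
    l.foldl (fun a x => a ++ [g x]) acc = acc ++ l.map g := by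
  induction l generalizing acc with
  | nil => simp
  | cons x xs ih => simp [ih]

theorem nbits_succ_high (n i : Nat) : nbits (n+1) i = i.testBit n :: nbits n i := by
  simp [nbits, List.range_succ]

theorem nbits_succ_low (n i : Nat) : nbits (n+1) i = nbits n (i/2) ++ [i.testBit 0] := by
  simp [nbits, List.range_succ_eq_map, List.map_map, Function.comp_def, Nat.testBit_add_one]

theorem nbits_zero_val (n : Nat) : nbits n 0 = List.replicate n false := by
  induction n with
  | zero => rfl
  | succ n ih => simp [nbits_succ_high, ih, List.replicate_succ]

theorem nbits_one (n : Nat) : nbits (n+1) 1 = List.replicate n false ++ [true] := by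
  simp [nbits_succ_low, nbits_zero_val]

theorem nbits_high_add (n : Nat) : ∀ j, nbits n (2^n + j) = nbits n j := by
  induction n with
  | zero => intro j; rfl
  | succ n ih =>
    intro j
    rw [nbits_succ_low, nbits_succ_low]
    have hp : 0 < 2^n := Nat.two_pow_pos n
    have hdiv : (2^(n+1) + j) / 2 = 2^n + j / 2 := by
      rw [pow_succ]
      omega
    have hbit : (2^(n+1) + j).testBit 0 = j.testBit 0 := by
      rw [Nat.testBit_zero, Nat.testBit_zero]
      have : (2^(n+1) + j) % 2 = j % 2 := by rw [pow_succ]; omega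
      rw [this]
    rw [hdiv, ih, hbit]

theorem testBit_high_true (n : Nat) : ∀ j, j < 2^n → (2^n + j).testBit n = true := by
  induction n with
  | zero => intro j hj; interval_cases j; rfl
  | succ n ih =>
    intro j hj
    rw [Nat.testBit_add_one]
    have hdiv : (2^(n+1) + j) / 2 = 2^n + j / 2 := by rw [pow_succ]; omega
    rw [hdiv]
    exact ih _ (by rw [pow_succ] at hj; omega)

theorem allVecs_eq (n : Nat) : allVecs n = (List.range (2^n)).map (nbits n) := by
  induction n with
  | zero => rfl
  | succ n ih =>
    have hsplit : List.range (2^(n+1)) = List.range (2^n) ++ (List.range (2^n)).map (2^n + ·) := by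
      rw [pow_succ, Nat.mul_two, List.range_add]
    rw [hsplit, List.map_append, List.map_map]
    show allVecs (n+1) = _
    rw [allVecs, ih, List.map_map, List.map_map]
    congr 1
    · apply List.map_congr_left
      intro k hk
      simp only [Function.comp_apply, List.mem_range] at hk ⊢
      rw [nbits_succ_high, Nat.testBit_lt_two_pow hk]
    · apply List.map_congr_left
      intro k hk
      simp only [Function.comp_apply, List.mem_range] at hk ⊢
      rw [nbits_succ_high, testBit_high_true n k hk, nbits_high_add]

theorem allVecs_len (n : Nat) : ∀ v ∈ allVecs n, v.length = n := by
  induction n with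
  | zero => simp [allVecs]
  | succ n ih =>
    intro v hv
    simp only [allVecs, List.mem_append, List.mem_map] at hv
    rcases hv with ⟨w, hw, rfl⟩ | ⟨w, hw, rfl⟩ <;> simp [ih w hw]

theorem drop_range_pow (n : Nat) :
    (List.range (2^n)).drop 1 = (List.range (2^n - 1)).map (fun k => 1 + k) := by
  have h : 2^n = (2^n - 1) + 1 := by have := Nat.two_pow_pos n; omega
  rw [h, List.range_succ_eq_map, List.drop_succ_cons, List.drop_zero]
  apply List.map_congr_left
  intro k _
  omega

theorem bin_main (n : Nat) : ∀ i, 1 ≤ i → i < 2^n →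
    List.replicate (n - (pyBinChars i).length) '0' ++ pyBinChars i = (nbits n i).map bchar := by
  induction n with
  | zero => intro i h1 h2; omega
  | succ n ih =>
    intro i h1 h2
    by_cases hi : i < 2
    · have : i = 1 := by omega
      subst this
      rw [pyBinChars]
      simp only [if_pos (by omega : (1:Nat) < 2)]
      rw [nbits_one]
      simp [bchar, List.map_replicate]
    · rw [pyBinChars, if_neg hi]
      have hlen : ((pyBinChars (i/2)) ++ [if i % 2 = 1 then '1' else '0']).length
          = (pyBinChars (i/2)).length + 1 := by simp
      rw [hlen]
      have hsub : (n + 1) - ((pyBinChars (i/2)).length + 1) = n - (pyBinChars (i/2)).length := by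
        omega
      rw [hsub, nbits_succ_low, List.map_append, ← List.append_assoc]
      have hp : 0 < 2^n := Nat.two_pow_pos n
      have ihh := ih (i/2) (by omega) (by rw [pow_succ] at h2; omega)
      rw [ihh]
      congr 1
      rw [Nat.testBit_zero]
      by_cases hm : i % 2 = 1 <;> simp [hm, bchar]

theorem pyBinChars_head (i : Nat) : ∃ c cs, pyBinChars i = c :: cs ∧ (c = '0' ∨ c = '1') := by
  induction i using Nat.strong_induction_on with
  | _ i ih =>
    rw [pyBinChars]
    by_cases hi : i < 2
    · rw [if_pos hi]
      by_cases h1 : i = 1 <;> simp [h1]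
    · rw [if_neg hi]
      obtain ⟨c, cs, hcs, hc⟩ := ih (i/2) (Nat.div_lt_self (by omega) (by omega))
      exact ⟨c, cs ++ [if i % 2 = 1 then '1' else '0'], by rw [hcs]; simp, hc⟩

theorem zfill_replicate (c : Char) (rest : List Char) (w : Int) (h1 : c ≠ '+') (h2 : c ≠ '-') :
    PySem.Chars.zfill (c :: rest) w = List.replicate (w.toNat - (c :: rest).length) '0' ++ (c :: rest) := by
  rw [PySem.Chars.zfill]
  split_ifs with hw hsign
  · have h0 : w.toNat - (c :: rest).length = 0 := by omega
    rw [h0]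
    rfl
  · exact absurd hsign (by tauto)
  · rfl

theorem zfill_bin (n i : Nat) (h1 : 1 ≤ i) (h2 : i < 2^n) :
    PySem.Chars.zfill (pyBinChars i) (n : Int) = (nbits n i).map bchar := by
  obtain ⟨c, cs, hcs, hc⟩ := pyBinChars_head i
  rw [hcs, zfill_replicate c cs (n : Int) (by rcases hc with h | h <;> subst h <;> decide)
    (by rcases hc with h | h <;> subst h <;> decide), ← hcs, Int.toNat_natCast]
  exact bin_main n i h1 h2

theorem writeN_int (pairs : List (Nat × Char)) : ∀ (s0 : List (Option String)),
    (pairs.map (fun p => ((p.1 : Int), p.2))).foldl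
      (fun s ib => if ib.2 = '0' then s.set ib.1.toNat (some "0") else s.set ib.1.toNat none) s0
    = writeN pairs s0 := by
  induction pairs with
  | nil => intro s0; rfl
  | cons p ps ih => intro s0; simp [writeN, List.foldl_cons, ih]

theorem writeN_shift (pairs : List (Nat × Char)) : ∀ (o : Option String) rest,
    writeN (pairs.map (fun p => (p.1 + 1, p.2))) (o :: rest) = o :: writeN pairs rest := by
  induction pairs with
  | nil => intro o rest; rfl
  | cons p ps ih =>
    intro o rest
    simp only [writeN, List.map_cons, List.foldl_cons, List.set_cons_succ] at ih ⊢
    split_ifs <;> exact ih _ _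

theorem writeN_main (segs : List String) : ∀ (v0 v : List Bool),
    v0.length = cz segs → v.length = cz segs →
    writeN ((zidxN segs).zip (v.map bchar)) (stA segs v0) = stA segs v := by
  induction segs with
  | nil =>
    intro v0 v _ _
    simp [zidxN, stA, writeN]
  | cons s r ih =>
    intro v0 v h0 h
    by_cases hs : s = "0"
    · subst hs
      simp only [cz] at h0 h
      cases v0 with
      | nil => simp at h0; omega
      | cons b0 v0' =>
        cases v with
        | nil => simp at h; omega
        | cons b v' =>
          simp only [zidxN, List.singleton_append, List.map_cons, List.zip_cons_cons,
            stA, writeN, List.foldl_cons, if_true]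
          have hset : ∀ (X : Option String),
              ((if b0 = true then none else some "0") :: stA r v0').set 0 X = X :: stA r v0' := by
            intro X; rfl
          have hbit : (if bchar b = '0' then
                ((if b0 = true then none else some "0") :: stA r v0').set 0 (some "0")
              else ((if b0 = true then none else some "0") :: stA r v0').set 0 none)
              = (if b = true then none else some "0") :: stA r v0' := by
            cases b <;> simp [bchar, hset]
          rw [hbit, List.zip_map_left]
          have hmap : (Prod.map (· + 1) id : Nat × Char → Nat × Char)
              = (fun p : Nat × Char => (p.1 + 1, p.2)) := by
            funext p; cases p; rfl
          rw [hmap]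
          have hshift := writeN_shift ((zidxN r).zip (v'.map bchar))
            (if b = true then none else some "0") (stA r v0')
          simp only [writeN] at hshift
          rw [hshift]
          have ihh := ih v0' v' (by simp at h0; omega) (by simp at h; omega)
          simp only [writeN] at ihh
          rw [ihh]
    · simp only [cz, if_neg hs] at h0 h
      simp only [zidxN, if_neg hs, List.nil_append, stA, List.zip_map_left]
      have hmap : (Prod.map (· + 1) id : Nat × Char → Nat × Char)
          = (fun p : Nat × Char => (p.1 + 1, p.2)) := by
        funext p; cases p; rfl
      have := writeN_shift ((zidxN r).zip (v.map bchar)) (some s) (stA r v0)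
      rw [hmap]
      rw [this, ih v0 v (by simpa using h0) (by simpa using h)]

theorem stA_init (segs : List String) : segs.map some = stA segs (List.replicate (cz segs) false) := by
  induction segs with
  | nil => rfl
  | cons s r ih =>
    by_cases hs : s = "0"
    · subst hs
      have hc : cz ("0" :: r) = cz r + 1 := by simp [cz]; omega
      rw [hc, List.replicate_succ]
      simp [stA, ih]
    · simp [cz, hs, stA, List.map_cons, ih]

theorem filter_stA (segs : List String) : ∀ (v : List Bool), v.length = cz segs →
    (stA segs v).filterMap (fun o => match o with
      | some s => if s = "" then none else some s
      | none => none)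
    = (pick segs v).filter (fun s => decide (s ≠ "")) := by
  induction segs with
  | nil => intro v _; rfl
  | cons s r ih =>
    intro v h
    by_cases hs : s = "0"
    · subst hs
      simp only [cz] at h
      cases v with
      | nil => simp at h; omega
      | cons b v' =>
        cases b <;>
          simp [stA, pick, ih v' (by simp at h; omega)]
    · simp only [cz, if_neg hs] at h
      by_cases he : s = "" <;>
        simp [stA, hs, pick, he, ih v (by omega)]

theorem gen_eq (segs : List String) : genCombos segs = (allVecs (cz segs)).map (pick segs) := by
  induction segs with
  | nil => rfl
  | cons s r ih =>
    by_cases hs : s = "0"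
    · subst hs
      have hc : cz ("0" :: r) = cz r + 1 := by simp [cz]; omega
      simp only [genCombos, if_true, ih, hc]
      rw [allVecs]
      simp only [List.map_append, List.map_map]
      congr 1
    · simp only [genCombos, if_neg hs, ih, cz, Nat.zero_add, List.map_map]
      apply List.map_congr_left
      intro v _
      simp [pick, hs]

theorem zip_cast_left (l : List Nat) (cs : List Char) :
    (l.map (fun k : Nat => (k : Int))).zip cs = (l.zip cs).map (fun p => ((p.1 : Int), p.2)) := by
  induction l generalizing cs with
  | nil => rfl
  | cons a l ih =>
    cases cs with
    | nil => rfl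
    | cons c cs =>
      simp only [List.map_cons, List.zip_cons_cons]
      rw [ih]

theorem outer_fold (segs : List String) : ∀ (vecs : List (List Bool)) (v0 : List Bool) (out : List String),
    v0.length = cz segs → (∀ v ∈ vecs, v.length = cz segs) →
    ((vecs.map (fun v => v.map bchar)).foldl
      (fun (st : List (Option String) × List String) bin_repr =>
        (((((zidxN segs).map (fun k : Nat => (k : Int))).zip bin_repr).foldl
          (fun s index_bit =>
            if index_bit.2 = '0' then s.set index_bit.1.toNat (some "0")
            else s.set index_bit.1.toNat none) st.1),
         st.2 ++ [PySem.Str.join "/" (((((zidxN segs).map (fun k : Nat => (k : Int))).zip bin_repr).foldl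
          (fun s index_bit =>
            if index_bit.2 = '0' then s.set index_bit.1.toNat (some "0")
            else s.set index_bit.1.toNat none) st.1).filterMap (fun o => match o with
          | some s => if s = "" then none else some s
          | none => none))]))
      (stA segs v0, out)).2
    = out ++ vecs.map (fun v => PySem.Str.join "/" ((pick segs v).filter (fun s => decide (s ≠ "")))) := by
  intro vecs
  induction vecs with
  | nil => intro v0 out _ _; simp
  | cons v rest ih =>
    intro v0 out h0 hall
    rw [List.map_cons, List.foldl_cons]
    have hv : v.length = cz segs := hall v (by simp)
    have hchars : ((((zidxN segs).map (fun k : Nat => (k : Int))).zip (v.map bchar)).foldl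
        (fun s index_bit =>
          if index_bit.2 = '0' then s.set index_bit.1.toNat (some "0")
          else s.set index_bit.1.toNat none) (stA segs v0)) = stA segs v := by
      rw [zip_cast_left, writeN_int, writeN_main segs v0 v h0 hv]
    simp only [hchars, filter_stA segs v hv]
    rw [ih v (out ++ [PySem.Str.join "/" ((pick segs v).filter (fun s => decide (s ≠ "")))]) hv
      (fun w hw => hall w (by simp [hw]))]
    simp

theorem main_eq (segs : List String) :
    (let cell_path_chars : List (Option String) := segs.map some
     let cell_zero_indexes : List Int :=
       (PySem.List.enumerate cell_path_chars 0).foldl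
         (fun acc p => if p.2 = some "0" then acc ++ [p.1] else acc) []
     let n_zeros : Nat := cell_zero_indexes.length
     let cell_zero_combinations : List (List Char) :=
       (PySem.List.pyRange 1 ((2 : Int) ^ n_zeros)).foldl
         (fun acc i => acc ++ [PySem.Chars.zfill (pyBinChars i.toNat) (n_zeros : Int)]) []
     let final :=
       cell_zero_combinations.foldl
         (fun (st : List (Option String) × List String) bin_repr =>
           let chars := (cell_zero_indexes.zip bin_repr).foldl
             (fun s index_bit =>
               if index_bit.2 = '0' then s.set index_bit.1.toNat (some "0")
               else s.set index_bit.1.toNat none) st.1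
           let path := PySem.Str.join "/" (chars.filterMap (fun o => match o with
             | some s => if s = "" then none else some s
             | none => none))
           (chars, st.2 ++ [path]))
         (cell_path_chars, [])
     final.2)
    = ((genCombos segs).drop 1).map (fun combo =>
        PySem.Str.join "/" (combo.filter (fun s => decide (s ≠ "")))) := by
  dsimp only
  rw [enumFold_eq segs 0 []]
  have hidx : ([] : List Int) ++ (zidxN segs).map (fun k => (0:Int) + (k:Int))
      = (zidxN segs).map (fun k : Nat => (k : Int)) := by simp [flatMap_cast]
  rw [hidx]
  have hlen : ((zidxN segs).map (fun k : Nat => (k : Int))).length = cz segs := by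
    simp [length_zidxN]
  rw [hlen]
  rw [foldl_app, PySem.List.pyRange_one]
  have htn : (((2:Int) ^ cz segs) - 1).toNat = 2 ^ cz segs - 1 := by
    have h1 : ((2:Int) ^ cz segs) = ((2 ^ cz segs : Nat) : Int) := by push_cast; ring
    have h2 := Nat.two_pow_pos (cz segs)
    omega
  rw [htn, List.map_map]
  have hcombos : (List.range (2 ^ cz segs - 1)).map
        ((fun i : Int => PySem.Chars.zfill (pyBinChars i.toNat) ((cz segs : Nat) : Int))
          ∘ (fun k : Nat => (1:Int) + k))
      = ((allVecs (cz segs)).drop 1).map (fun v => v.map bchar) := by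
    rw [allVecs_eq, ← List.map_drop, drop_range_pow, List.map_map, List.map_map]
    apply List.map_congr_left
    intro k hk
    simp only [Function.comp_apply, List.mem_range] at hk ⊢
    have htn2 : ((1:Int) + (k:Nat)).toNat = 1 + k := by omega
    rw [htn2]
    exact zfill_bin (cz segs) (1+k) (by omega)
      (by have := Nat.two_pow_pos (cz segs); omega)
  rw [hcombos, stA_init segs, List.nil_append]
  rw [outer_fold segs ((allVecs (cz segs)).drop 1) (List.replicate (cz segs) false) []
    (by simp) (fun v hv => allVecs_len (cz segs) v (List.drop_subset 1 (allVecs (cz segs)) hv))]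
  rw [gen_eq, ← List.map_drop, List.map_map]
  simp [Function.comp_def]

-- ===== VERDICT (by name: the statement is the Claim_ definition above) =====
theorem get_zero_paths_list_spec : Claim_equal_get_zero_paths_list := by
  intro cell_path _
  unfold Spec_get_zero_paths_list get_zero_paths_list get_zero_paths_list_alt
  exact main_eq ((PySem.Str.split? cell_path "/").getD [])
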